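-- pv_equiv track=rewrite | github.com/takapdayon/atcoder | abc/AtCoderBeginnerContest083/B.py | Some_Sums
-- ===== SOURCE A (Python) =====
-- def Some_Sums(n , a , b):
--
--     ans = 0
--
--     for i in range(1 , n + 1):
--         s = str(i)
--         array = list(map(int , s))
--         if a <= sum(array) and sum(array) <= b:
--             ans += i
--
--     return ans
-- ===== SOURCE B (Python) =====
-- def digsum(m):
--     t = 0
--     while m > 0:
--         t += m % 10
--         m //= 10
--     return t
--
--
-- def hist(n):
--     # digit-sum histogram of [0, n]: (cnt, sm) with cnt[s] = how many i in [0, n]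
--     # have digit sum s, and sm[s] = the total of those i
--     if n < 10:
--         return {s: 1 for s in range(n + 1)}, {s: s for s in range(n + 1)}
--     m, d = divmod(n, 10)
--     c1, s1 = hist(m - 1)
--     cnt = {}
--     for s, c in c1.items():
--         for r in range(10):
--             cnt[s + r] = cnt.get(s + r, 0) + c
--     sm = {}
--     for s, c in c1.items():
--         for r in range(10):
--             sm[s + r] = sm.get(s + r, 0) + 10 * s1[s] + r * c
--     t = digsum(m)
--     for r in range(d + 1):
--         cnt[t + r] = cnt.get(t + r, 0) + 1
--     for r in range(d + 1):
--         sm[t + r] = sm.get(t + r, 0) + 10 * m + r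
--     return cnt, sm
--
--
-- def Some_Sums(n, a, b):
--     if n < 0:
--         return 0
--     cnt, sm = hist(n)
--     return sum(v for s, v in sm.items() if a <= s <= b)
-- ===== Notes on version B (the rewrite author's own statement) =====
-- stated objective: faster
-- what changed: Replaces the per-number scan (string conversion and digit sum for every i in 1..n) with a digit DP that recursively builds, per digit-sum value, the count and total of the numbers in [0,n] and then sums the totals with digit sum in [a,b].
import Mathlib
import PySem

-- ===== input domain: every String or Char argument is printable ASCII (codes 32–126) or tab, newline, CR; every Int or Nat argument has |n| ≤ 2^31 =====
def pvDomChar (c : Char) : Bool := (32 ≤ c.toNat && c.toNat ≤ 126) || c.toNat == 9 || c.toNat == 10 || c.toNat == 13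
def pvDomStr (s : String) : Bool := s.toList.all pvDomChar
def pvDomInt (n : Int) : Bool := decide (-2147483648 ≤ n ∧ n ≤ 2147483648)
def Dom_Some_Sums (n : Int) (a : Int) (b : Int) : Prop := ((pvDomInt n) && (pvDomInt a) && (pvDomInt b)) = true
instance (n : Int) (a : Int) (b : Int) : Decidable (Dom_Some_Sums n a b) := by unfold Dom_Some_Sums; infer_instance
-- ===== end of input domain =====

-- B replaces A's per-number string/digit scan of 1..n by a recursive digit-DP histogram
-- (count and total per digit-sum value over [0, n]); objective: faster (asymptotic).

-- ===== PORT A =====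
-- int(c) for one character c; exact on the digit characters '0'..'9' that str(i) yields for i ≥ 1
def pyDigit (c : Char) : Int := (c.toNat : Int) - 48

def Some_Sums (n : Int) (a : Int) (b : Int) : Int :=
  (PySem.List.pyRange 1 (n + 1) 1).foldl
    (fun ans i =>
      let array := (PySem.Int.toStr i).toList.map pyDigit
      if a ≤ array.sum ∧ array.sum ≤ b then ans + i else ans)
    0

-- ===== PORT B =====
-- digsum(m): while m > 0: t += m % 10; m //= 10  (m ≥ 0 always at the call site, so Nat)
def digsumB (m : Nat) (t : Int) : Int :=
  if 0 < m then digsumB (m / 10) (t + ((m % 10 : Nat) : Int)) else t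
  termination_by m
  decreasing_by exact Nat.div_lt_self (by omega) (by norm_num)

-- hist(n) of Source B (n ≥ 0 always at the call site, so Nat).
-- Python's s1[s] lookup is ported as getD _ 0: exact, because cnt and sm always share key sets.
def histB (n : Nat) : PySem.Dict Int Int × PySem.Dict Int Int :=
  if n < 10 then
    ((List.range (n + 1)).foldl (fun d (s : Nat) => d.insert (s : Int) 1) PySem.Dict.empty,
     (List.range (n + 1)).foldl (fun d (s : Nat) => d.insert (s : Int) (s : Int)) PySem.Dict.empty)
  else
    let m := n / 10
    let d := n % 10
    let p := histB (m - 1)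
    let c1 := p.1
    let s1 := p.2
    let cnt := c1.items.foldl
      (fun acc q => (List.range 10).foldl
        (fun a2 (r : Nat) => a2.insert (q.1 + (r : Int)) (a2.getD (q.1 + (r : Int)) 0 + q.2)) acc)
      PySem.Dict.empty
    let sm := c1.items.foldl
      (fun acc q => (List.range 10).foldl
        (fun a2 (r : Nat) => a2.insert (q.1 + (r : Int))
          (a2.getD (q.1 + (r : Int)) 0 + (10 * s1.getD q.1 0 + (r : Int) * q.2))) acc)
      PySem.Dict.empty
    let t := digsumB m 0
    let cnt2 := (List.range (d + 1)).foldl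
      (fun acc (r : Nat) => acc.insert (t + (r : Int)) (acc.getD (t + (r : Int)) 0 + 1)) cnt
    let sm2 := (List.range (d + 1)).foldl
      (fun acc (r : Nat) => acc.insert (t + (r : Int)) (acc.getD (t + (r : Int)) 0 + (10 * (m : Int) + (r : Int)))) sm
    (cnt2, sm2)
  termination_by n
  decreasing_by have := Nat.div_le_self n 10; omega

def Some_Sums_alt (n : Int) (a : Int) (b : Int) : Int :=
  if n < 0 then 0
  else
    -- cnt, sm = hist(n); only sm is used afterwards
    let sm := (histB n.toNat).2
    sm.items.foldl (fun acc q => if a ≤ q.1 ∧ q.1 ≤ b then acc + q.2 else acc) 0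

-- ===== PRECONDITION & SPEC =====
def Spec_Some_Sums (n : Int) (a : Int) (b : Int) (out : Int) : Prop := out = Some_Sums_alt n a b
instance (n : Int) (a : Int) (b : Int) (out : Int) : Decidable (Spec_Some_Sums n a b out) := by unfold Spec_Some_Sums; infer_instance

-- ===== CLAIM (what is proved, stated in full; the proofs are below) =====
def Claim_equal_Some_Sums : Prop := ∀ (n : Int) (a : Int) (b : Int), Dom_Some_Sums n a b → Spec_Some_Sums n a b (Some_Sums n a b)

-- ===== LEMMAS AND PROOFS =====

-- digit sum of i, the mathematical reference
def ds (i : Nat) : Nat := (Nat.digits 10 i).sum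

-- count / total of the i < k whose digit sum is s
def cntZ (k : Nat) (s : Int) : Int :=
  ((List.range k).map (fun i => if (ds i : Int) = s then 1 else 0)).sum
def smZ (k : Nat) (s : Int) : Int :=
  ((List.range k).map (fun i => if (ds i : Int) = s then (i : Int) else 0)).sum

lemma ds_lt_ten {i : Nat} (h : i < 10) : ds i = i := by
  rcases Nat.eq_zero_or_pos i with h0 | h0
  · simp [ds, h0]
  · simp [ds, Nat.digits_def' (by norm_num : (1:Nat) < 10) h0, Nat.mod_eq_of_lt h, Nat.div_eq_of_lt h]

lemma ds_mul_add (q r : Nat) (h : r < 10) : ds (10 * q + r) = ds q + r := by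
  rcases Nat.eq_zero_or_pos (10 * q + r) with h0 | h0
  · have hq : q = 0 := by omega
    have hr : r = 0 := by omega
    subst hq; subst hr; simp [ds]
  · have h1 : (10 * q + r) % 10 = r := by omega
    have h2 : (10 * q + r) / 10 = q := by omega
    unfold ds
    rw [Nat.digits_def' (by norm_num : (1:Nat) < 10) h0, h1, h2, List.sum_cons]
    omega

lemma digsumB_eq (m : Nat) (t : Int) : digsumB m t = t + (ds m : Int) := by
  induction m using Nat.strong_induction_on generalizing t with
  | _ m ih =>
    rw [digsumB]
    by_cases h : 0 < m
    · rw [if_pos h, ih (m / 10) (Nat.div_lt_self h (by norm_num))]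
      have hds : ds m = m % 10 + ds (m / 10) := by
        simp [ds, Nat.digits_def' (by norm_num : (1:Nat) < 10) h]
      rw [hds]; push_cast; ring
    · have : m = 0 := by omega
      subst this; simp [ds]

lemma pyDigit_digitChar (d : Nat) (h : d < 10) : pyDigit (Nat.digitChar d) = (d : Int) := by
  interval_cases d <;> decide

lemma toDigitsCore_sum (fuel : Nat) : ∀ (n : Nat) (acc : List Char), n < 10 ^ fuel →
    ((Nat.toDigitsCore 10 fuel n acc).map pyDigit).sum = (ds n : Int) + (acc.map pyDigit).sum := by
  induction fuel with
  | zero =>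
    intro n acc h
    have : n = 0 := by simpa using h
    subst this
    simp [Nat.toDigitsCore, ds]
  | succ fuel ih =>
    intro n acc h
    rw [Nat.toDigitsCore]
    by_cases h0 : n / 10 = 0
    · have hn : n < 10 := by omega
      rw [if_pos h0]
      have hmod : n % 10 = n := Nat.mod_eq_of_lt hn
      simp only [List.map_cons, List.sum_cons, hmod, pyDigit_digitChar n hn, ds_lt_ten hn]
    · rw [if_neg h0]
      have hlt : n / 10 < 10 ^ fuel := by
        rw [Nat.div_lt_iff_lt_mul (by norm_num)]
        calc n < 10 ^ (fuel + 1) := h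
        _ = 10 ^ fuel * 10 := by ring
      rw [ih (n / 10) _ hlt]
      have hds : ds n = n % 10 + ds (n / 10) := by
        simp [ds, Nat.digits_def' (by norm_num : (1:Nat) < 10) (by omega : 0 < n)]
      rw [hds]
      simp [pyDigit_digitChar (n % 10) (by omega)]
      ring

lemma digit_sum_toStr (i : Int) (h : 1 ≤ i) :
    ((PySem.Int.toStr i).toList.map pyDigit).sum = ((ds i.toNat : Nat) : Int) := by
  rw [PySem.Int.toList_toStr]
  have hneg : ¬ i < 0 := by omega
  rw [PySem.Int.toChars, if_neg hneg, Nat.toDigits]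
  have hb : i.toNat < 10 ^ (i.toNat + 1) := by
    calc i.toNat < 10 ^ i.toNat := Nat.lt_pow_self (by norm_num)
    _ ≤ 10 ^ (i.toNat + 1) := Nat.pow_le_pow_right (by norm_num) (Nat.le_succ _)
  rw [toDigitsCore_sum (i.toNat + 1) i.toNat [] hb]
  simp

-- list-level double sum swap
lemma sum_swap_list {α β : Type} (l1 : List α) (l2 : List β) (f : α → β → Int) :
    (l1.map (fun x => (l2.map (f x)).sum)).sum = (l2.map (fun y => (l1.map (fun x => f x y)).sum)).sum := by
  induction l1 with
  | nil => simp
  | cons x xs ih => simp only [List.map_cons, List.sum_cons, ih, PySem.List.sum_map_add_int]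

-- fiber of a keyed sum over an association list
lemma fiber_not_mem (l : List (Int × Int)) (t : Int) (g : Int → Int → Int)
    (h : t ∉ l.map Prod.fst) :
    (l.map (fun p => if p.1 = t then g p.1 p.2 else 0)).sum = 0 := by
  induction l with
  | nil => simp
  | cons p l ih =>
    have h1 : ¬ p.1 = t := by
      intro he; exact h (by simp [List.map_cons, he])
    have h2 : t ∉ l.map Prod.fst := by
      intro hm; exact h (by simp [List.map_cons, hm])
    simp only [List.map_cons, List.sum_cons, if_neg h1, zero_add, ih h2]

lemma fiber_mem (l : List (Int × Int)) (t v : Int) (g : Int → Int → Int)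
    (hmem : (t, v) ∈ l) (hnd : (l.map Prod.fst).Nodup) :
    (l.map (fun p => if p.1 = t then g p.1 p.2 else 0)).sum = g t v := by
  induction l with
  | nil => simp at hmem
  | cons p l ih =>
    rcases List.mem_cons.mp hmem with heq | hmem'
    · have hnin : t ∉ l.map Prod.fst := by
        have := (List.nodup_cons.mp hnd).1
        rw [← heq] at this; exact this
      simp only [List.map_cons, List.sum_cons, ← heq,
        fiber_not_mem l t g hnin, add_zero]
      simp
    · have hne : ¬ p.1 = t := by
        intro he
        have ht : t ∈ l.map Prod.fst := List.mem_map.mpr ⟨(t, v), hmem', rfl⟩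
        rw [← he] at ht
        exact (List.nodup_cons.mp hnd).1 ht
      simp only [List.map_cons, List.sum_cons, if_neg hne, zero_add,
        ih hmem' (List.nodup_cons.mp hnd).2]

-- getD after a fold of read-modify-insert updates
lemma getD_foldl_insert_add {β : Type} (key : β → Int) (amt : β → Int) (l : List β)
    (d0 : PySem.Dict Int Int) (s : Int) :
    (l.foldl (fun d x => d.insert (key x) (d.getD (key x) 0 + amt x)) d0).getD s 0
      = d0.getD s 0 + (l.map (fun x => if key x = s then amt x else 0)).sum := by
  induction l generalizing d0 with
  | nil => simp
  | cons x xs ih =>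
    simp only [List.foldl_cons, List.map_cons, List.sum_cons, ih, PySem.Dict.getD_insert]
    by_cases hc : s = key x
    · rw [if_pos hc, if_pos hc.symm, hc]; ring
    · rw [if_neg hc, if_neg (fun he => hc he.symm)]; ring

-- the nested update loop of hist
lemma getD_double_fold {β : Type} (key : β → Nat → Int) (amt : β → Nat → Int) (l : List β)
    (d0 : PySem.Dict Int Int) (s : Int) :
    (l.foldl (fun acc q => (List.range 10).foldl
        (fun a2 r => a2.insert (key q r) (a2.getD (key q r) 0 + amt q r)) acc) d0).getD s 0
      = d0.getD s 0 + (l.map (fun q => ((List.range 10).map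
          (fun r => if key q r = s then amt q r else 0)).sum)).sum := by
  induction l generalizing d0 with
  | nil => simp
  | cons q xs ih =>
    simp only [List.foldl_cons, List.map_cons, List.sum_cons, ih,
      getD_foldl_insert_add (key q) (amt q) (List.range 10) d0 s]
    ring

lemma keys_double_fold {β : Type} (key : β → Nat → Int) (amt : β → Nat → Int) (l : List β)
    (d0 : PySem.Dict Int Int) :
    (l.foldl (fun acc q => (List.range 10).foldl
        (fun a2 r => a2.insert (key q r) (a2.getD (key q r) 0 + amt q r)) acc) d0).keys
      = l.foldl (fun ks q => PySem.Set.update ks ((List.range 10).map (key q))) d0.keys := by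
  induction l generalizing d0 with
  | nil => simp
  | cons q xs ih =>
    simp only [List.foldl_cons, ih, PySem.Dict.keys_foldl_insert_key]

lemma mem_keys_set_folds {β : Type} (key : β → Nat → Int) (l : List β) (ks0 : List Int) (x : Int)
    (h : x ∈ ks0 ∨ ∃ q ∈ l, ∃ r ∈ List.range 10, key q r = x) :
    x ∈ l.foldl (fun ks q => PySem.Set.update ks ((List.range 10).map (key q))) ks0 := by
  induction l generalizing ks0 with
  | nil =>
    simp only [List.foldl_nil]
    rcases h with h | ⟨q, hq, _⟩
    · exact h
    · simp at hq
  | cons q xs ih =>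
    simp only [List.foldl_cons]
    apply ih
    rcases h with h | ⟨p, hp, r, hr, hk⟩
    · exact Or.inl ((PySem.Set.mem_update _ _ _).mpr (Or.inl h))
    · rcases List.mem_cons.mp hp with heq | hmem
      · subst heq
        exact Or.inl ((PySem.Set.mem_update _ _ _).mpr
          (Or.inr (List.mem_map.mpr ⟨r, hr, hk⟩)))
      · exact Or.inr ⟨p, hmem, r, hr, hk⟩

lemma nodup_keys_double_fold {β : Type} (key : β → Nat → Int) (amt : β → Nat → Int) (l : List β)
    (d0 : PySem.Dict Int Int) (h : d0.keys.Nodup) :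
    (l.foldl (fun acc q => (List.range 10).foldl
        (fun a2 r => a2.insert (key q r) (a2.getD (key q r) 0 + amt q r)) acc) d0).keys.Nodup := by
  induction l generalizing d0 with
  | nil => exact h
  | cons q xs ih =>
    simp only [List.foldl_cons]
    exact ih _ (PySem.Dict.nodup_keys_foldl_insert_key _ _ _ _ h)

-- block decomposition of a sum over range
lemma range_tenblock (m : Nat) (f : Nat → Int) :
    ((List.range (10 * m)).map f).sum
      = ((List.range m).map (fun q => ((List.range 10).map (fun r => f (10 * q + r))).sum)).sum := by
  induction m with
  | zero => simp
  | succ m ih =>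
    rw [show 10 * (m + 1) = 10 * m + 10 from by ring, List.range_add, List.map_append,
      List.sum_append, ih, List.range_succ (n := m), List.map_append, List.sum_append]
    simp [List.map_map, Function.comp_def]

lemma range_block (m d : Nat) (f : Nat → Int) :
    ((List.range (10 * m + d + 1)).map f).sum
      = ((List.range m).map (fun q => ((List.range 10).map (fun r => f (10 * q + r))).sum)).sum
        + ((List.range (d + 1)).map (fun r => f (10 * m + r))).sum := by
  rw [show 10 * m + d + 1 = 10 * m + (d + 1) from by ring, List.range_add, List.map_append,
    List.sum_append, range_tenblock]
  simp [List.map_map, Function.comp_def]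

lemma cntZ_eq_zero_of_not_mem (k : Nat) (t : Int) (K : List Int)
    (hcov : ∀ i < k, ((ds i : Nat) : Int) ∈ K) (h : t ∉ K) : cntZ k t = 0 := by
  apply List.sum_eq_zero
  intro x hx
  rcases List.mem_map.mp hx with ⟨i, hi, rfl⟩
  rw [if_neg]
  intro he
  exact h (he ▸ hcov i (List.mem_range.mp hi))

lemma smZ_eq_zero_of_not_mem (k : Nat) (t : Int) (K : List Int)
    (hcov : ∀ i < k, ((ds i : Nat) : Int) ∈ K) (h : t ∉ K) : smZ k t = 0 := by
  apply List.sum_eq_zero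
  intro x hx
  rcases List.mem_map.mp hx with ⟨i, hi, rfl⟩
  rw [if_neg]
  intro he
  exact h (he ▸ hcov i (List.mem_range.mp hi))


-- getD after the base-case insert loops
lemma base_getD (k : Nat) (f : Nat → Int) (t : Int) :
    ((List.range k).foldl (fun d s => d.insert (s : Int) (f s)) PySem.Dict.empty).getD t 0
      = ((List.range k).map (fun s : Nat => if (s : Int) = t then f s else 0)).sum := by
  induction k with
  | zero => simp
  | succ k ih =>
    rw [List.range_succ (n := k), List.foldl_append, List.map_append, List.sum_append]
    simp only [List.foldl_cons, List.foldl_nil, List.map_cons, List.map_nil,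
      List.sum_cons, List.sum_nil]
    rw [PySem.Dict.getD_insert]
    by_cases hc : t = (k : Int)
    · rw [if_pos hc, if_pos hc.symm]
      have hz : ((List.range k).map (fun s : Nat => if (s : Int) = t then f s else 0)).sum = 0 := by
        apply List.sum_eq_zero
        intro x hx
        rcases List.mem_map.mp hx with ⟨s, hs, rfl⟩
        rw [if_neg]
        intro he
        have hs' := List.mem_range.mp hs
        rw [hc] at he
        have : s = k := by exact_mod_cast he
        omega
      rw [hz]; ring
    · rw [if_neg hc, if_neg (fun he => hc he.symm), ih]; ring

-- fiber of an item sum over a dict with nodup keys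
lemma items_fiber (c1 : PySem.Dict Int Int) (hnd : c1.keys.Nodup) (t : Int) (g : Int → Int → Int) :
    (c1.items.map (fun p => if p.1 = t then g p.1 p.2 else 0)).sum
      = if t ∈ c1.keys then g t (c1.getD t 0) else 0 := by
  have hkdef : c1.keys = c1.items.map Prod.fst := rfl
  have hnd' : (c1.items.map Prod.fst).Nodup := by rw [← hkdef]; exact hnd
  by_cases hk : t ∈ c1.keys
  · rw [if_pos hk]
    rcases List.mem_map.mp (by rw [← hkdef]; exact hk : t ∈ c1.items.map Prod.fst)
      with ⟨p, hp, hp1⟩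
    have hmem : (t, p.2) ∈ c1.items := by rw [← hp1]; exact hp
    rw [fiber_mem c1.items t p.2 g hmem hnd',
      PySem.Dict.getD_of_mem_items c1 hmem hnd]
  · rw [if_neg hk, fiber_not_mem]
    rw [← hkdef]; exact hk

-- Σ_{q<m} [ds q = t]·(10q + r) expressed through smZ and cntZ
lemma inner_sm (m : Nat) (t : Int) (r : Int) :
    ((List.range m).map (fun q => if (ds q : Int) = t then 10 * (q : Int) + r else 0)).sum
      = 10 * smZ m t + r * cntZ m t := by
  have hpt : ∀ q : Nat, (if (ds q : Int) = t then 10 * (q : Int) + r else 0)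
      = 10 * (if (ds q : Int) = t then (q : Int) else 0)
        + r * (if (ds q : Int) = t then 1 else 0) := by
    intro q; split_ifs <;> ring
  simp only [hpt, PySem.List.sum_map_add_int]
  unfold smZ cntZ
  rw [List.sum_map_mul_left, List.sum_map_mul_left]

-- specialised rewriting lemmas, verbatim in the shapes histB produces
lemma getD_tail_cnt (dsm : Int) (k : Nat) (d0 : PySem.Dict Int Int) (s : Int) :
    ((List.range k).foldl (fun acc r => acc.insert (dsm + (r : Int))
        (acc.getD (dsm + (r : Int)) 0 + 1)) d0).getD s 0
      = d0.getD s 0 + ((List.range k).map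
          (fun r : Nat => if dsm + (r : Int) = s then (1 : Int) else 0)).sum :=
  getD_foldl_insert_add _ _ _ _ _

lemma getD_tail_sm (dsm mi : Int) (k : Nat) (d0 : PySem.Dict Int Int) (s : Int) :
    ((List.range k).foldl (fun acc r => acc.insert (dsm + (r : Int))
        (acc.getD (dsm + (r : Int)) 0 + (10 * mi + (r : Int)))) d0).getD s 0
      = d0.getD s 0 + ((List.range k).map
          (fun r : Nat => if dsm + (r : Int) = s then 10 * mi + (r : Int) else 0)).sum :=
  getD_foldl_insert_add _ _ _ _ _

lemma getD_cnt_double (L : List (Int × Int)) (d0 : PySem.Dict Int Int) (s : Int) :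
    (L.foldl (fun acc q => (List.range 10).foldl (fun a2 r => a2.insert (q.1 + (r : Int))
        (a2.getD (q.1 + (r : Int)) 0 + q.2)) acc) d0).getD s 0
      = d0.getD s 0 + (L.map (fun q => ((List.range 10).map
          (fun r : Nat => if q.1 + (r : Int) = s then q.2 else 0)).sum)).sum :=
  getD_double_fold _ _ _ _ _

lemma getD_sm_double (L : List (Int × Int)) (s1 : PySem.Dict Int Int) (d0 : PySem.Dict Int Int) (s : Int) :
    (L.foldl (fun acc q => (List.range 10).foldl (fun a2 r => a2.insert (q.1 + (r : Int))
        (a2.getD (q.1 + (r : Int)) 0 + (10 * s1.getD q.1 0 + (r : Int) * q.2))) acc) d0).getD s 0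
      = d0.getD s 0 + (L.map (fun q => ((List.range 10).map
          (fun r : Nat => if q.1 + (r : Int) = s then 10 * s1.getD q.1 0 + (r : Int) * q.2 else 0)).sum)).sum :=
  getD_double_fold _ _ _ _ _

lemma keys_tail_cnt (dsm : Int) (k : Nat) (d0 : PySem.Dict Int Int) :
    ((List.range k).foldl (fun acc r => acc.insert (dsm + (r : Int))
        (acc.getD (dsm + (r : Int)) 0 + 1)) d0).keys
      = PySem.Set.update d0.keys ((List.range k).map (fun r : Nat => dsm + (r : Int))) :=
  PySem.Dict.keys_foldl_insert_key _ _ _ _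

lemma keys_tail_sm (dsm mi : Int) (k : Nat) (d0 : PySem.Dict Int Int) :
    ((List.range k).foldl (fun acc r => acc.insert (dsm + (r : Int))
        (acc.getD (dsm + (r : Int)) 0 + (10 * mi + (r : Int)))) d0).keys
      = PySem.Set.update d0.keys ((List.range k).map (fun r : Nat => dsm + (r : Int))) :=
  PySem.Dict.keys_foldl_insert_key _ _ _ _

lemma keys_cnt_double (L : List (Int × Int)) (d0 : PySem.Dict Int Int) :
    (L.foldl (fun acc q => (List.range 10).foldl (fun a2 r => a2.insert (q.1 + (r : Int))
        (a2.getD (q.1 + (r : Int)) 0 + q.2)) acc) d0).keys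
      = L.foldl (fun ks q => PySem.Set.update ks ((List.range 10).map
          (fun r : Nat => q.1 + (r : Int)))) d0.keys :=
  keys_double_fold _ _ _ _

lemma keys_sm_double (L : List (Int × Int)) (s1 : PySem.Dict Int Int) (d0 : PySem.Dict Int Int) :
    (L.foldl (fun acc q => (List.range 10).foldl (fun a2 r => a2.insert (q.1 + (r : Int))
        (a2.getD (q.1 + (r : Int)) 0 + (10 * s1.getD q.1 0 + (r : Int) * q.2))) acc) d0).keys
      = L.foldl (fun ks q => PySem.Set.update ks ((List.range 10).map
          (fun r : Nat => q.1 + (r : Int)))) d0.keys :=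
  keys_double_fold _ _ _ _

-- the cnt / sm inner sums over the items of the previous level
lemma cnt_inner (c1 : PySem.Dict Int Int) (M : Nat) (hnd : c1.keys.Nodup)
    (hcov : ∀ i < M, ((ds i : Nat) : Int) ∈ c1.keys)
    (h1 : ∀ t, c1.getD t 0 = cntZ M t) (r : Nat) (hr : r < 10) (s : Int) :
    (c1.items.map (fun q => if q.1 + (r : Int) = s then q.2 else 0)).sum
      = ((List.range M).map (fun q => if ((ds (10 * q + r) : Nat) : Int) = s then (1 : Int) else 0)).sum := by
  have hcond : ∀ q ∈ c1.items, (if q.1 + (r : Int) = s then q.2 else 0)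
      = (if q.1 = s - (r : Int) then q.2 else 0) := by
    intro q _; exact if_congr (by omega) rfl rfl
  rw [List.map_congr_left hcond,
    items_fiber c1 hnd (s - (r : Int)) (fun _ v => v)]
  have hR : ∀ q' ∈ List.range M, (if ((ds (10 * q' + r) : Nat) : Int) = s then (1 : Int) else 0)
      = (if ((ds q' : Nat) : Int) = s - (r : Int) then (1 : Int) else 0) := by
    intro q' _
    refine if_congr ?_ rfl rfl
    rw [ds_mul_add q' r hr]; push_cast; omega
  rw [List.map_congr_left hR]
  by_cases hk : (s - (r : Int)) ∈ c1.keys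
  · rw [if_pos hk, h1 (s - (r : Int))]; rfl
  · rw [if_neg hk]
    exact (cntZ_eq_zero_of_not_mem M (s - (r : Int)) c1.keys hcov hk).symm

lemma sm_inner (c1 s1 : PySem.Dict Int Int) (M : Nat) (hnd : c1.keys.Nodup)
    (hcov : ∀ i < M, ((ds i : Nat) : Int) ∈ c1.keys)
    (h1 : ∀ t, c1.getD t 0 = cntZ M t) (h2 : ∀ t, s1.getD t 0 = smZ M t)
    (r : Nat) (hr : r < 10) (s : Int) :
    (c1.items.map (fun q => if q.1 + (r : Int) = s then 10 * s1.getD q.1 0 + (r : Int) * q.2 else 0)).sum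
      = ((List.range M).map (fun q => if ((ds (10 * q + r) : Nat) : Int) = s
          then ((10 * q + r : Nat) : Int) else 0)).sum := by
  have hcond : ∀ q ∈ c1.items, (if q.1 + (r : Int) = s then 10 * s1.getD q.1 0 + (r : Int) * q.2 else 0)
      = (if q.1 = s - (r : Int) then 10 * s1.getD q.1 0 + (r : Int) * q.2 else 0) := by
    intro q _; exact if_congr (by omega) rfl rfl
  rw [List.map_congr_left hcond,
    items_fiber c1 hnd (s - (r : Int)) (fun k v => 10 * s1.getD k 0 + (r : Int) * v)]
  have hR : ∀ q' ∈ List.range M, (if ((ds (10 * q' + r) : Nat) : Int) = s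
        then ((10 * q' + r : Nat) : Int) else 0)
      = (if ((ds q' : Nat) : Int) = s - (r : Int) then 10 * (q' : Int) + (r : Int) else 0) := by
    intro q' _
    refine if_congr ?_ (by push_cast; ring) rfl
    rw [ds_mul_add q' r hr]; push_cast; omega
  rw [List.map_congr_left hR, inner_sm M (s - (r : Int)) (r : Int)]
  by_cases hk : (s - (r : Int)) ∈ c1.keys
  · rw [if_pos hk, h1 (s - (r : Int)), h2 (s - (r : Int))]
  · rw [if_neg hk, cntZ_eq_zero_of_not_mem M (s - (r : Int)) c1.keys hcov hk,
      smZ_eq_zero_of_not_mem M (s - (r : Int)) c1.keys hcov hk]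
    ring

-- the main invariant of the histogram DP
theorem histB_spec (n : Nat) :
    (∀ s, (histB n).1.getD s 0 = cntZ (n + 1) s) ∧
    (∀ s, (histB n).2.getD s 0 = smZ (n + 1) s) ∧
    (∀ i < n + 1, ((ds i : Nat) : Int) ∈ (histB n).1.keys) ∧
    (histB n).1.keys.Nodup ∧
    (histB n).1.keys = (histB n).2.keys := by
  induction n using Nat.strong_induction_on with
  | _ n ih =>
  by_cases hlt : n < 10
  · rw [histB, if_pos hlt]
    dsimp only
    refine ⟨?_, ?_, ?_, ?_, ?_⟩
    · intro s
      show ((List.range (n + 1)).foldl (fun d (s : Nat) => d.insert (s : Int) 1)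
        PySem.Dict.empty).getD s 0 = cntZ (n + 1) s
      rw [base_getD (n + 1) (fun _ => (1 : Int)) s]
      refine congrArg List.sum (List.map_congr_left ?_)
      intro i hi
      have hi10 : i < 10 := by have := List.mem_range.mp hi; omega
      rw [ds_lt_ten hi10]
    · intro s
      show ((List.range (n + 1)).foldl (fun d (s : Nat) => d.insert (s : Int) (s : Int))
        PySem.Dict.empty).getD s 0 = smZ (n + 1) s
      rw [base_getD (n + 1) (fun s' => (s' : Int)) s]
      refine congrArg List.sum (List.map_congr_left ?_)
      intro i hi
      have hi10 : i < 10 := by have := List.mem_range.mp hi; omega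
      rw [ds_lt_ten hi10]
    · intro i hi
      rw [show ((List.range (n + 1)).foldl (fun d (s : Nat) => d.insert (s : Int) 1)
            (PySem.Dict.empty : PySem.Dict Int Int)).keys
          = PySem.Set.update (PySem.Dict.empty : PySem.Dict Int Int).keys
              ((List.range (n + 1)).map (fun s : Nat => (s : Int)))
        from PySem.Dict.keys_foldl_insert_key _ _ _ _]
      refine (PySem.Set.mem_update _ _ _).mpr (Or.inr ?_)
      refine List.mem_map.mpr ⟨ds i, ?_, rfl⟩
      have hi10 : i < 10 := by omega
      rw [ds_lt_ten hi10]
      exact List.mem_range.mpr hi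
    · exact PySem.Dict.nodup_keys_foldl_insert_key _ _ _ _ PySem.Dict.nodup_keys_empty
    · rw [show ((List.range (n + 1)).foldl (fun d (s : Nat) => d.insert (s : Int) 1)
            (PySem.Dict.empty : PySem.Dict Int Int)).keys
          = PySem.Set.update (PySem.Dict.empty : PySem.Dict Int Int).keys
              ((List.range (n + 1)).map (fun s : Nat => (s : Int)))
        from PySem.Dict.keys_foldl_insert_key _ _ _ _,
        show ((List.range (n + 1)).foldl (fun d (s : Nat) => d.insert (s : Int) (s : Int))
            (PySem.Dict.empty : PySem.Dict Int Int)).keys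
          = PySem.Set.update (PySem.Dict.empty : PySem.Dict Int Int).keys
              ((List.range (n + 1)).map (fun s : Nat => (s : Int)))
        from PySem.Dict.keys_foldl_insert_key _ _ _ _]
  · rw [histB, if_neg hlt]
    dsimp only
    have hdle := Nat.div_le_self n 10
    obtain ⟨ih1, ih2, ihcov, ihnd, ihkeq⟩ := ih (n / 10 - 1) (by omega)
    have hm1 : n / 10 - 1 + 1 = n / 10 := by omega
    rw [hm1] at ih1 ih2 ihcov
    refine ⟨?_, ?_, ?_, ?_, ?_⟩
    · intro s
      rw [getD_tail_cnt, getD_cnt_double, PySem.Dict.getD_empty, zero_add,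
        show n + 1 = 10 * (n / 10) + n % 10 + 1 from by omega]
      unfold cntZ
      rw [range_block]
      congr 1
      · rw [sum_swap_list ((histB (n / 10 - 1)).1.items) (List.range 10)
            (fun q (r : Nat) => if q.1 + (r : Int) = s then q.2 else 0),
          sum_swap_list (List.range (n / 10)) (List.range 10)
            (fun q (r : Nat) => if ((ds (10 * q + r) : Nat) : Int) = s then (1 : Int) else 0)]
        refine congrArg List.sum (List.map_congr_left ?_)
        intro r hr
        exact cnt_inner _ (n / 10) ihnd ihcov ih1 r (by have := List.mem_range.mp hr; omega) s
      · refine congrArg List.sum (List.map_congr_left ?_)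
        intro r hrm
        have hr10 : r < 10 := by have := List.mem_range.mp hrm; omega
        rw [digsumB_eq, ds_mul_add _ r hr10]
        refine if_congr ?_ rfl rfl
        push_cast
        constructor <;> intro <;> omega
    · intro s
      rw [getD_tail_sm, getD_sm_double, PySem.Dict.getD_empty, zero_add,
        show n + 1 = 10 * (n / 10) + n % 10 + 1 from by omega]
      unfold smZ
      rw [range_block]
      congr 1
      · rw [sum_swap_list ((histB (n / 10 - 1)).1.items) (List.range 10)
            (fun q (r : Nat) => if q.1 + (r : Int) = s
              then 10 * (histB (n / 10 - 1)).2.getD q.1 0 + (r : Int) * q.2 else 0),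
          sum_swap_list (List.range (n / 10)) (List.range 10)
            (fun q (r : Nat) => if ((ds (10 * q + r) : Nat) : Int) = s
              then ((10 * q + r : Nat) : Int) else 0)]
        refine congrArg List.sum (List.map_congr_left ?_)
        intro r hr
        exact sm_inner _ _ (n / 10) ihnd ihcov ih1 ih2 r
          (by have := List.mem_range.mp hr; omega) s
      · refine congrArg List.sum (List.map_congr_left ?_)
        intro r hrm
        have hr10 : r < 10 := by have := List.mem_range.mp hrm; omega
        rw [digsumB_eq, ds_mul_add _ r hr10]
        refine if_congr ?_ (by push_cast; ring) rfl
        push_cast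
        constructor <;> intro <;> omega
    · intro i hi
      rw [keys_tail_cnt, keys_cnt_double]
      refine (PySem.Set.mem_update _ _ _).mpr ?_
      by_cases hq : i / 10 < n / 10
      · left
        refine mem_keys_set_folds _ _ _ _ (Or.inr ?_)
        have hds : ((ds (i / 10) : Nat) : Int) ∈ (histB (n / 10 - 1)).1.keys :=
          ihcov (i / 10) (by omega)
        have hkdef : (histB (n / 10 - 1)).1.keys
            = (histB (n / 10 - 1)).1.items.map Prod.fst := rfl
        rw [hkdef] at hds
        rcases List.mem_map.mp hds with ⟨p, hp, hp1⟩
        refine ⟨p, hp, i % 10, List.mem_range.mpr (by omega), ?_⟩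
        rw [hp1]
        have hdsi : ds i = ds (i / 10) + i % 10 := by
          conv_lhs => rw [show i = 10 * (i / 10) + i % 10 from by omega]
          exact ds_mul_add _ _ (by omega)
        rw [hdsi]; push_cast; ring
      · right
        have hqe : i / 10 = n / 10 := by omega
        refine List.mem_map.mpr ⟨i % 10, List.mem_range.mpr (by omega), ?_⟩
        rw [digsumB_eq]
        have hdsi : ds i = ds (n / 10) + i % 10 := by
          conv_lhs => rw [show i = 10 * (n / 10) + i % 10 from by omega]
          exact ds_mul_add _ _ (by omega)
        rw [hdsi]; push_cast; ring
    · exact PySem.Dict.nodup_keys_foldl_insert_key _ _ _ _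
        (nodup_keys_double_fold _ _ _ _ PySem.Dict.nodup_keys_empty)
    · rw [keys_tail_cnt, keys_tail_sm, keys_cnt_double, keys_sm_double]

theorem Some_Sums_eq_sum (n a b : Int) (h : 0 ≤ n) :
    Some_Sums n a b = ((List.range (n.toNat + 1)).map
      (fun i => if a ≤ (ds i : Int) ∧ (ds i : Int) ≤ b then (i : Int) else 0)).sum := by
  unfold Some_Sums
  rw [PySem.List.pyRange_one, show ((n + 1 : Int) - 1).toNat = n.toNat from by omega,
    List.foldl_map]
  rw [PySem.List.foldl_congr_mem _ _
    (fun (ans : Int) (k : Nat) => ans + (if a ≤ ((ds (k + 1) : Nat) : Int)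
      ∧ ((ds (k + 1) : Nat) : Int) ≤ b then ((k + 1 : Nat) : Int) else 0)) _ ?_]
  · rw [PySem.List.foldl_add, zero_add, List.range_succ_eq_map, List.map_cons,
      List.sum_cons, List.map_map]
    have h0 : (if a ≤ ((ds 0 : Nat) : Int) ∧ ((ds 0 : Nat) : Int) ≤ b
        then ((0 : Nat) : Int) else 0) = 0 := by
      rw [Nat.cast_zero]; exact ite_self 0
    rw [h0, zero_add]
    refine congrArg List.sum (List.map_congr_left ?_)
    intro k _
    rfl
  · intro ans k hk
    dsimp only
    have ht : ((1 : Int) + (k : Int)).toNat = k + 1 := by omega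
    rw [digit_sum_toStr (1 + (k : Int)) (by omega), ht]
    by_cases hc : a ≤ ((ds (k + 1) : Nat) : Int) ∧ ((ds (k + 1) : Nat) : Int) ≤ b
    · rw [if_pos hc, if_pos hc]; push_cast; ring
    · rw [if_neg hc, if_neg hc]; ring

theorem Some_Sums_alt_eq_sum (n a b : Int) (h : 0 ≤ n) :
    Some_Sums_alt n a b = ((List.range (n.toNat + 1)).map
      (fun i => if a ≤ (ds i : Int) ∧ (ds i : Int) ≤ b then (i : Int) else 0)).sum := by
  unfold Some_Sums_alt
  rw [if_neg (by omega : ¬ n < 0)]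
  dsimp only
  obtain ⟨h1, h2, hcov, hnd, hkeq⟩ := histB_spec n.toNat
  have hnd2 : (histB n.toNat).2.keys.Nodup := hkeq ▸ hnd
  rw [PySem.List.foldl_congr_mem _ _
    (fun (acc : Int) (q : Int × Int) => acc + (if a ≤ q.1 ∧ q.1 ≤ b then q.2 else 0)) _ ?_]
  · rw [PySem.List.foldl_add, zero_add]
    have hitem : ∀ p ∈ (histB n.toNat).2.items,
        (if a ≤ p.1 ∧ p.1 ≤ b then p.2 else 0)
        = ((List.range (n.toNat + 1)).map (fun i => if ((ds i : Nat) : Int) = p.1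
            then (if a ≤ p.1 ∧ p.1 ≤ b then (i : Int) else 0) else 0)).sum := by
      intro p hp
      have hv : p.2 = smZ (n.toNat + 1) p.1 := by
        have hg : (histB n.toNat).2.getD p.1 0 = p.2 :=
          PySem.Dict.getD_of_mem_items (histB n.toNat).2 hp hnd2 0
        rw [← hg, h2]
      by_cases hc : a ≤ p.1 ∧ p.1 ≤ b
      · rw [if_pos hc, hv]
        unfold smZ
        refine congrArg List.sum (List.map_congr_left ?_)
        intro i _
        by_cases hd : ((ds i : Nat) : Int) = p.1
        · rw [if_pos hd, if_pos hd, if_pos hc]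
        · rw [if_neg hd, if_neg hd]
      · rw [if_neg hc]
        symm
        apply List.sum_eq_zero
        intro x hx
        rcases List.mem_map.mp hx with ⟨i, _, rfl⟩
        rw [if_neg hc, ite_self]
      -- note: the ite with both branches 0 vanishes
    rw [List.map_congr_left hitem, sum_swap_list]
    refine congrArg List.sum (List.map_congr_left ?_)
    intro i hi
    have hcond : ∀ p ∈ (histB n.toNat).2.items,
        (if ((ds i : Nat) : Int) = p.1 then (if a ≤ p.1 ∧ p.1 ≤ b then (i : Int) else 0) else 0)
        = (if p.1 = ((ds i : Nat) : Int) then (if a ≤ p.1 ∧ p.1 ≤ b then (i : Int) else 0) else 0) := by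
      intro p _
      exact if_congr eq_comm rfl rfl
    rw [List.map_congr_left hcond,
      items_fiber (histB n.toNat).2 hnd2 ((ds i : Nat) : Int)
        (fun k _ => if a ≤ k ∧ k ≤ b then (i : Int) else 0),
      if_pos (hkeq ▸ hcov i (List.mem_range.mp hi))]
  · intro acc q hq
    dsimp only
    by_cases hc : a ≤ q.1 ∧ q.1 ≤ b
    · rw [if_pos hc, if_pos hc]
    · rw [if_neg hc, if_neg hc]; ring

-- ===== VERDICT (by name: the statement is the Claim_ definition above) =====
theorem Some_Sums_spec : Claim_equal_Some_Sums := by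
  intro n a b _
  unfold Spec_Some_Sums
  rcases lt_or_ge n 0 with hn | hn
  · have hA : Some_Sums n a b = 0 := by
      unfold Some_Sums
      have : PySem.List.pyRange 1 (n + 1) 1 = [] := by
        rw [PySem.List.pyRange_one]  -- length (n+1)-1 ≤ 0
        have h0 : ((n + 1 : Int) - 1).toNat = 0 := by omega
        rw [h0]; simp
      simp [this]
    have hB : Some_Sums_alt n a b = 0 := by unfold Some_Sums_alt; simp [hn]
    rw [hA, hB]
  · rw [Some_Sums_eq_sum n a b hn, Some_Sums_alt_eq_sum n a b hn]
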